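-- pv_equiv track=rewrite | github.com/rslinford/Advent_of_Code | day_10.py | score_the_leftovers
-- ===== SOURCE A (Python) =====
-- def score_the_leftovers(leftovers):
--     total_score = 0
--     for c in leftovers:
--         total_score *= 5
--         match c:
--             case '(' | ')':
--                 total_score += 1
--             case '[' | ']':
--                 total_score += 2
--             case '{' | '}':
--                 total_score += 3
--             case '<' | '>':
--                 total_score += 4
--
--     return total_score
-- ===== SOURCE B (Python) =====
-- VAL = {'(': 1, ')': 1, '[': 2, ']': 2, '{': 3, '}': 3, '<': 4, '>': 4}
--
--
-- def score_the_leftovers(leftovers):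
--     total = 0
--     power = 1
--     for c in reversed(leftovers):
--         total += VAL.get(c, 0) * power
--         power *= 5
--     return total
-- ===== Notes on version B (the rewrite author's own statement) =====
-- stated objective: alternative
-- what changed: Replaces the left-to-right Horner accumulation with match/case by a right-to-left pass that keeps an explicit power-of-5 accumulator and reads each character's value from a dict with default 0.
import Mathlib
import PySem

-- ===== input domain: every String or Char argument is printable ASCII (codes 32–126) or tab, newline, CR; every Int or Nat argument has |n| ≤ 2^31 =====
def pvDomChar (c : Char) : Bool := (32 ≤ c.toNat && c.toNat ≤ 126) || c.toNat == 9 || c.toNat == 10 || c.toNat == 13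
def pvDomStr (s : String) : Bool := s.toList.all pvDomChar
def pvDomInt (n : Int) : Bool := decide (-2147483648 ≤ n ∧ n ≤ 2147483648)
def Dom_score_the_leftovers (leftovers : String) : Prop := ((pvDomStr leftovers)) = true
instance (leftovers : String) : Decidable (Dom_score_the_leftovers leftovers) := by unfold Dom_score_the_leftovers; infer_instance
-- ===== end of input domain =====

-- B replaces A's left-to-right Horner loop (match/case) with a right-to-left pass keeping an
-- explicit power-of-5 accumulator and a dict lookup with default 0; equivalence of return values.

-- ===== PORT A =====
def score_the_leftovers (leftovers : String) : Int :=
  leftovers.toList.foldl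
    (fun total_score c =>
      let total_score := total_score * 5
      if c = '(' ∨ c = ')' then total_score + 1
      else if c = '[' ∨ c = ']' then total_score + 2
      else if c = '{' ∨ c = '}' then total_score + 3
      else if c = '<' ∨ c = '>' then total_score + 4
      else total_score) 0

-- ===== PORT B =====
def pvVAL : PySem.Dict Char Int :=
  PySem.Dict.ofList [('(', 1), (')', 1), ('[', 2), (']', 2), ('{', 3), ('}', 3), ('<', 4), ('>', 4)]

def score_the_leftovers_alt (leftovers : String) : Int :=
  (leftovers.toList.reverse.foldl
    (fun (st : Int × Int) c => (st.1 + (pvVAL.getD c 0) * st.2, st.2 * 5)) (0, 1)).1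

-- ===== PRECONDITION & SPEC =====
def Spec_score_the_leftovers (leftovers : String) (out : Int) : Prop := out = score_the_leftovers_alt leftovers
instance (leftovers : String) (out : Int) : Decidable (Spec_score_the_leftovers leftovers out) := by unfold Spec_score_the_leftovers; infer_instance

-- ===== CLAIM (what is proved, stated in full; the proofs are below) =====
def Claim_equal_score_the_leftovers : Prop := ∀ (leftovers : String), Dom_score_the_leftovers leftovers → Spec_score_the_leftovers leftovers (score_the_leftovers leftovers)

-- ===== LEMMAS AND PROOFS =====

-- A's per-character value as a function
def pvValA (c : Char) : Int :=
  if c = '(' ∨ c = ')' then 1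
  else if c = '[' ∨ c = ']' then 2
  else if c = '{' ∨ c = '}' then 3
  else if c = '<' ∨ c = '>' then 4
  else 0

theorem pvVAL_items : pvVAL.items = [('(', 1), (')', 1), ('[', 2), (']', 2), ('{', 3), ('}', 3), ('<', 4), ('>', 4)] := by decide

theorem pvVal_eq (c : Char) : pvVAL.getD c 0 = pvValA c := by
  unfold pvValA
  split_ifs with h1 h2 h3 h4
  · rcases h1 with h | h <;> subst h <;> decide
  · rcases h2 with h | h <;> subst h <;> decide
  · rcases h3 with h | h <;> subst h <;> decide
  · rcases h4 with h | h <;> subst h <;> decide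
  · push Not at h1 h2 h3 h4
    have hf : pvVAL.items.find? (fun p => p.1 == c) = none := by
      apply List.find?_eq_none.mpr
      intro x hx
      rw [pvVAL_items] at hx
      fin_cases hx <;> intro hbeq <;> have hc := (eq_of_beq hbeq).symm <;> simp_all
    simp [PySem.Dict.getD, PySem.Dict.get?, hf]

-- A's fold step written with pvValA
theorem stepA_eq (t : Int) (c : Char) :
    (let t' := t * 5;
      if c = '(' ∨ c = ')' then t' + 1
      else if c = '[' ∨ c = ']' then t' + 2
      else if c = '{' ∨ c = '}' then t' + 3
      else if c = '<' ∨ c = '>' then t' + 4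
      else t') = t * 5 + pvValA c := by
  simp only [pvValA]
  split_ifs <;> omega

theorem foldB (r : List Char) (t p : Int) :
    r.foldl (fun (st : Int × Int) c => (st.1 + (pvVAL.getD c 0) * st.2, st.2 * 5)) (t, p)
      = (t + p * r.reverse.foldl (fun t c => t * 5 + pvValA c) 0, p * 5 ^ r.length) := by
  induction r generalizing t p with
  | nil => simp
  | cons c r ih =>
    simp only [List.foldl_cons, List.reverse_cons, List.length_cons]
    rw [ih, List.foldl_append, pvVal_eq]
    simp only [List.foldl_cons, List.foldl_nil, Prod.mk.injEq]
    constructor <;> ring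

-- ===== VERDICT (by name: the statement is the Claim_ definition above) =====
theorem score_the_leftovers_spec : Claim_equal_score_the_leftovers := by
  intro leftovers _
  unfold Spec_score_the_leftovers score_the_leftovers score_the_leftovers_alt
  rw [foldB]
  simp only [List.reverse_reverse]
  have h : ∀ (t : Int) (c : Char),
      (let t' := t * 5;
        if c = '(' ∨ c = ')' then t' + 1
        else if c = '[' ∨ c = ']' then t' + 2
        else if c = '{' ∨ c = '}' then t' + 3
        else if c = '<' ∨ c = '>' then t' + 4
        else t') = t * 5 + pvValA c := stepA_eq
  rw [show (fun (total_score : Int) (c : Char) =>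
        let total_score := total_score * 5;
        if c = '(' ∨ c = ')' then total_score + 1
        else if c = '[' ∨ c = ']' then total_score + 2
        else if c = '{' ∨ c = '}' then total_score + 3
        else if c = '<' ∨ c = '>' then total_score + 4
        else total_score) = (fun t c => t * 5 + pvValA c) from funext fun t => funext fun c => h t c]
  ring
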